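-- pv_equiv track=rewrite | github.com/jweigend/cloudcase-2026 | showcases/solr-spark-taxi/tools/prometheus_to_dimensional.py | analyze_metrics
-- ===== SOURCE A (Python) =====
-- from collections import defaultdict
--
-- def is_info_metric(metric_name: str) -> bool:
--     """Prüft ob es eine _info Metrik ist (werden ignoriert)."""
--     return metric_name.endswith('_info')
--
-- def strip_job_prefix(metric_name: str, job: str) -> str:
--     """
--     Entfernt das Job-Präfix vom Metriknamen wenn vorhanden.
--
--     Beispiel: solr_metrics_core_errors (job=solr) → metrics_core_errors
--     """
--     if job and metric_name.startswith(job + '_'):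
--         return metric_name[len(job) + 1:]
--     return metric_name
--
-- def analyze_metrics(series_list: list[dict[str, str]]) -> dict[tuple[str, str], int]:
--     """
--     Analysiert alle Serien und zählt Varianten pro (job, prefix).
--
--     Zählt für JEDEN Präfix, nicht nur den kompletten Metriknamen.
--     Das ermöglicht rekursive Erweiterung.
--
--     Beispiel: metrics_core_query_errors_total wird gezählt für:
--       - (job, metrics)
--       - (job, metrics_core)
--       - (job, metrics_core_query)
--       - (job, metrics_core_query_errors)
--       - (job, metrics_core_query_errors_total)
--
--     Returns: Dict mit {(job, prefix): variant_count}
--     """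
--     prefix_counts = defaultdict(int)
--
--     for series in series_list:
--         metric_name = series.get('__name__', '')
--         if is_info_metric(metric_name):
--             continue
--
--         job = series.get('job', '')
--         stripped = strip_job_prefix(metric_name, job)
--
--         # Zähle für alle Präfix-Längen
--         parts = stripped.split('_')
--         for i in range(1, len(parts) + 1):
--             prefix = '_'.join(parts[:i])
--             prefix_counts[(job, prefix)] += 1
--
--     return dict(prefix_counts)
-- ===== SOURCE B (Python) =====
-- def analyze_metrics(series_list):
--     counts = {}
--     for series in series_list:
--         name = series.get('__name__', '')
--         if name.endswith('_info'):
--             continue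
--         job = series.get('job', '')
--         if job and name.startswith(job + '_'):
--             name = name[len(job) + 1:]
--         # Enumerate prefixes with a single character scan: every '_' marks the
--         # end of one prefix (the text before it), and the whole name is the last.
--         prefix = ''
--         for ch in name:
--             if ch == '_':
--                 key = (job, prefix)
--                 counts[key] = counts.get(key, 0) + 1
--             prefix += ch
--         key = (job, prefix)
--         counts[key] = counts.get(key, 0) + 1
--     return counts
-- ===== Notes on version B (the rewrite author's own statement) =====
-- stated objective: alternative
-- what changed: A enumerates prefixes by splitting the name on '_' and, for each i, re-joining parts[:i]; B does one character scan per name, bumping the running prefix at every '_' and once at the end, so no split/slice/join lists are built.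
import Mathlib
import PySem

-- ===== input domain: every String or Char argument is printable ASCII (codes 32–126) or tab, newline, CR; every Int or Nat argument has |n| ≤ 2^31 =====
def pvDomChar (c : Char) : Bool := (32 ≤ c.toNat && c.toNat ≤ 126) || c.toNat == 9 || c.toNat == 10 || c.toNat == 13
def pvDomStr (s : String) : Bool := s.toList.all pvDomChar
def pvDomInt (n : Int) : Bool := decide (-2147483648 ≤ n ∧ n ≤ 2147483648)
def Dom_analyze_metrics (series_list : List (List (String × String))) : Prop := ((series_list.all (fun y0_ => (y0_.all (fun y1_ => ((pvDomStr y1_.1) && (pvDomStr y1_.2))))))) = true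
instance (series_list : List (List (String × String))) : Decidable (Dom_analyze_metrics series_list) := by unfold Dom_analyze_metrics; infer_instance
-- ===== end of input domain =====

-- B replaces A's split-then-rejoin prefix enumeration by a single character scan per name
-- that bumps the running prefix at every '_' (objective: alternative decomposition).

-- ===== PORT A =====
def is_info_metric (metric_name : String) : Bool :=
  PySem.Str.endswith metric_name "_info"

def strip_job_prefix (metric_name : String) (job : String) : String :=
  if (!(job == "") && PySem.Str.startswith metric_name (job ++ "_")) then
    PySem.Str.slice metric_name (some (PySem.Str.len job + 1)) none
  else metric_name

def analyze_metrics (series_list : List (List (String × String))) : List (String × String × Int) :=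
  (series_list.foldl (fun (prefix_counts : PySem.Dict (String × String) Int) series =>
      let metric_name := PySem.Dict.getD (PySem.Dict.mk series) "__name__" ""
      if is_info_metric metric_name then prefix_counts
      else
        let job := PySem.Dict.getD (PySem.Dict.mk series) "job" ""
        let stripped := strip_job_prefix metric_name job
        -- parts = stripped.split('_'); the separator "_" is nonempty, so split? is `some`
        let parts := (PySem.Str.split? stripped "_").getD []
        (PySem.List.pyRange 1 ((parts.length : Int) + 1) 1).foldl
          (fun d i =>
            let pfx := PySem.Str.join "_" (PySem.List.slice parts none (some i))
            PySem.Dict.modify d (job, pfx) 0 (· + 1))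
          prefix_counts)
    PySem.Dict.empty).items.map (fun p => (p.1.1, p.1.2, p.2))

-- ===== PORT B =====
def analyze_metrics_alt (series_list : List (List (String × String))) : List (String × String × Int) :=
  (series_list.foldl (fun (counts : PySem.Dict (String × String) Int) series =>
      let name := PySem.Dict.getD (PySem.Dict.mk series) "__name__" ""
      if PySem.Str.endswith name "_info" then counts
      else
        let job := PySem.Dict.getD (PySem.Dict.mk series) "job" ""
        let name2 :=
          if (!(job == "") && PySem.Str.startswith name (job ++ "_")) then
            PySem.Str.slice name (some (PySem.Str.len job + 1)) none
          else name
        -- single scan: bump the running prefix at every '_', then once for the whole name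
        let st := name2.toList.foldl
          (fun (s : PySem.Dict (String × String) Int × List Char) ch =>
            let s1 := if ch = '_' then
                PySem.Dict.insert s.1 (job, String.ofList s.2)
                  (PySem.Dict.getD s.1 (job, String.ofList s.2) 0 + 1)
              else s.1
            (s1, s.2 ++ [ch])) (counts, [])
        PySem.Dict.insert st.1 (job, String.ofList st.2)
          (PySem.Dict.getD st.1 (job, String.ofList st.2) 0 + 1))
    PySem.Dict.empty).items.map (fun p => (p.1.1, p.1.2, p.2))

-- ===== PRECONDITION & SPEC =====
def Spec_analyze_metrics (series_list : List (List (String × String))) (out : List (String × String × Int)) : Prop := out = analyze_metrics_alt series_list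
instance (series_list : List (List (String × String))) (out : List (String × String × Int)) : Decidable (Spec_analyze_metrics series_list out) := by unfold Spec_analyze_metrics; infer_instance

-- ===== CLAIM (what is proved, stated in full; the proofs are below) =====
def Claim_equal_analyze_metrics : Prop := ∀ (series_list : List (List (String × String))), Dom_analyze_metrics series_list → Spec_analyze_metrics series_list (analyze_metrics series_list)

-- ===== LEMMAS AND PROOFS =====

-- split on a single character, structurally
def splitC : List Char → List (List Char)
  | [] => [[]]
  | x :: xs => if x = '_' then [] :: splitC xs else (splitC xs).modifyHead (x :: ·)

-- the prefixes B bumps inside the loop (excluding the final full name)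
def prefC (pre : List Char) : List Char → List (List Char)
  | [] => []
  | x :: xs => if x = '_' then pre :: prefC (pre ++ [x]) xs else prefC (pre ++ [x]) xs

-- the joined prefixes A enumerates
def joins (l : List Char) : List (List Char) :=
  (List.range (splitC l).length).map (fun j => PySem.Chars.join ['_'] ((splitC l).take (j + 1)))

lemma splitC_ne_nil (l : List Char) : splitC l ≠ [] := by
  cases l with
  | nil => simp [splitC]
  | cons x xs =>
    simp only [splitC]
    split_ifs
    · simp
    · cases h : splitC xs with
      | nil => exact absurd h (splitC_ne_nil xs)
      | cons q ps => simp [List.modifyHead]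

lemma go_char (l : List Char) (fuel : Nat) (cur : List Char) (acc : List (List Char))
    (h : l.length ≤ fuel) :
    PySem.Chars.splitOn.go ['_'] fuel l cur acc
      = acc.reverse ++ (splitC l).modifyHead (cur.reverse ++ ·) := by
  induction l generalizing fuel cur acc with
  | nil =>
    cases fuel <;> rw [PySem.Chars.splitOn.go.eq_def] <;> simp [splitC, List.modifyHead]
  | cons c rest ih =>
    cases fuel with
    | zero => simp at h
    | succ f =>
      rw [PySem.Chars.splitOn.go.eq_def]
      simp only []
      by_cases hc : c = '_'
      · subst hc
        have hp : List.isPrefixOf ['_'] ('_' :: rest) = true := by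
          simp [List.isPrefixOf]
        simp only [hp, List.length_cons, List.drop_succ_cons, List.drop_zero,
          List.length_nil, if_pos trivial]
        rw [ih f [] ((cur.reverse) :: acc) (by simpa using Nat.le_of_succ_le_succ h)]
        simp [splitC]
        exact congrFun List.modifyHead_id (splitC rest)
      · have hp : List.isPrefixOf ['_'] (c :: rest) = false := by
          simp [List.isPrefixOf]
          exact fun hh => absurd hh.symm hc
        simp only [hp, Bool.false_eq_true, if_false]
        rw [ih f (c :: cur) acc (by simpa using Nat.le_of_succ_le_succ h)]
        simp only [splitC, if_neg hc]
        cases hs : splitC rest with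
        | nil => exact absurd hs (splitC_ne_nil rest)
        | cons q ps => simp [List.modifyHead]


lemma splitOn_single (s : List Char) : PySem.Chars.splitOn s ['_'] = splitC s := by
  show PySem.Chars.splitOn.go ['_'] (s.length + 1) s [] [] = splitC s
  rw [go_char s (s.length + 1) [] [] (Nat.le_succ _)]
  have h : (fun x : List Char => [].reverse ++ x) = id := by funext x; simp
  rw [h, List.modifyHead_id]
  simp

lemma join_cons_cons' (x : Char) (p : List Char) (ps : List (List Char)) :
    PySem.Chars.join ['_'] ((x :: p) :: ps) = x :: PySem.Chars.join ['_'] (p :: ps) := by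
  cases ps with
  | nil => simp [PySem.Chars.join_singleton]
  | cons r rs => simp [PySem.Chars.join_cons_cons]

lemma joins_nil : joins [] = [[]] := by
  simp [joins, splitC, PySem.Chars.join_singleton]

lemma joins_underscore (xs : List Char) :
    joins ('_' :: xs) = [] :: (joins xs).map ('_' :: ·) := by
  simp only [joins, splitC, if_pos trivial, List.length_cons, List.range_succ_eq_map,
    List.map_cons, List.map_map]
  rw [List.cons_eq_cons]
  constructor
  · simp [PySem.Chars.join_singleton]
  · apply List.map_congr_left
    intro j hj
    cases hs : splitC xs with
    | nil => exact absurd hs (splitC_ne_nil xs)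
    | cons q ps =>
      simp only [Function.comp_apply, Nat.succ_eq_add_one, List.take_succ_cons]
      rw [PySem.Chars.join_cons_cons]
      simp

lemma joins_char (x : Char) (hx : x ≠ '_') (xs : List Char) :
    joins (x :: xs) = (joins xs).map (x :: ·) := by
  simp only [joins, splitC, if_neg hx]
  cases hs : splitC xs with
  | nil => exact absurd hs (splitC_ne_nil xs)
  | cons q ps =>
    simp only [List.modifyHead, List.length_cons, List.map_map]
    apply List.map_congr_left
    intro j hj
    simp only [Function.comp_apply, List.take_succ_cons]
    exact join_cons_cons' x q (ps.take j)

lemma prefC_append_eq (l : List Char) : ∀ (pre : List Char),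
    prefC pre l ++ [pre ++ l] = (joins l).map (pre ++ ·) := by
  induction l with
  | nil => intro pre; simp [prefC, joins_nil]
  | cons x xs ih =>
    intro pre
    by_cases hx : x = '_'
    · subst hx
      simp only [prefC, if_pos trivial, List.cons_append, joins_underscore,
        List.map_cons, List.append_nil, List.map_map]
      rw [List.cons_eq_cons]
      constructor
      · rfl
      · rw [show pre ++ '_' :: xs = (pre ++ ['_']) ++ xs from by simp, ih (pre ++ ['_'])]
        apply List.map_congr_left
        intro p _
        simp
    · simp only [prefC, if_neg hx, joins_char x hx xs, List.map_map]
      rw [show pre ++ x :: xs = (pre ++ [x]) ++ xs from by simp, ih (pre ++ [x])]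
      apply List.map_congr_left
      intro p _
      simp

-- the common bump operation; A's Dict.modify k 0 (· + 1) is definitionally this
def bump (d : PySem.Dict (String × String) Int) (k : String × String) : PySem.Dict (String × String) Int :=
  PySem.Dict.insert d k (PySem.Dict.getD d k 0 + 1)

lemma loopB (job : String) (l : List Char) : ∀ (pre : List Char) (d : PySem.Dict (String × String) Int),
    l.foldl
      (fun (s : PySem.Dict (String × String) Int × List Char) ch =>
        let s1 := if ch = '_' then
            PySem.Dict.insert s.1 (job, String.ofList s.2)
              (PySem.Dict.getD s.1 (job, String.ofList s.2) 0 + 1)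
          else s.1
        (s1, s.2 ++ [ch])) (d, pre)
    = ((prefC pre l).foldl (fun d p => bump d (job, String.ofList p)) d, pre ++ l) := by
  induction l with
  | nil => intro pre d; simp [prefC]
  | cons x xs ih =>
    intro pre d
    by_cases hx : x = '_'
    · subst hx
      simp only [List.foldl_cons, if_pos trivial]
      rw [ih (pre ++ ['_'])]
      simp [prefC, bump]
    · simp only [List.foldl_cons, if_neg hx]
      rw [ih (pre ++ [x])]
      simp [prefC, if_neg hx]

lemma pyRange_one_natCast (n : Nat) :
    PySem.List.pyRange 1 ((n : Int) + 1) 1 = (List.range n).map (fun j => ((j + 1 : Nat) : Int)) := by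
  have h0 := PySem.List.pyRange_zero_natCast (n + 1)
  have h1 : (0 : Int) < ((n + 1 : Nat) : Int) := by push_cast; omega
  rw [PySem.List.pyRange_one_cons h1] at h0
  rw [List.range_succ_eq_map, List.map_cons] at h0
  have h2 := (List.cons_eq_cons.mp h0).2
  rw [show ((n + 1 : Nat) : Int) = (n : Int) + 1 from by push_cast; ring] at h2
  rw [show (0 : Int) + 1 = 1 from by ring] at h2
  rw [h2, List.map_map]
  rfl

-- the per-series inner loops agree
lemma inner_eq (job stripped : String) (d : PySem.Dict (String × String) Int) :
    (let parts := (PySem.Str.split? stripped "_").getD []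
     (PySem.List.pyRange 1 ((parts.length : Int) + 1) 1).foldl
       (fun d i =>
         let pfx := PySem.Str.join "_" (PySem.List.slice parts none (some i))
         PySem.Dict.modify d (job, pfx) 0 (· + 1)) d)
    = (let st := stripped.toList.foldl
         (fun (s : PySem.Dict (String × String) Int × List Char) ch =>
           let s1 := if ch = '_' then
               PySem.Dict.insert s.1 (job, String.ofList s.2)
                 (PySem.Dict.getD s.1 (job, String.ofList s.2) 0 + 1)
             else s.1
           (s1, s.2 ++ [ch])) (d, [])
       PySem.Dict.insert st.1 (job, String.ofList st.2)
         (PySem.Dict.getD st.1 (job, String.ofList st.2) 0 + 1)) := by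
  have hparts : (PySem.Str.split? stripped "_").getD []
      = (splitC stripped.toList).map String.ofList := by
    rw [PySem.Str.split?.eq_1]
    simp [PySem.Chars.split?, splitOn_single]
  simp only [hparts, loopB job stripped.toList [] d, List.nil_append, List.length_map]
  -- right side: the loop keys plus the final full-string key are exactly `joins`
  have hB : PySem.Dict.insert
        ((prefC [] stripped.toList).foldl (fun d p => bump d (job, String.ofList p)) d)
        (job, String.ofList stripped.toList)
        (PySem.Dict.getD ((prefC [] stripped.toList).foldl (fun d p => bump d (job, String.ofList p)) d)
          (job, String.ofList stripped.toList) 0 + 1)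
      = (joins stripped.toList).foldl (fun d p => bump d (job, String.ofList p)) d := by
    have hp : prefC [] stripped.toList ++ [stripped.toList] = joins stripped.toList := by
      simpa using prefC_append_eq stripped.toList []
    rw [← hp, List.foldl_append]
    rfl
  rw [hB, pyRange_one_natCast, List.foldl_map, joins, List.foldl_map]
  apply PySem.List.foldl_congr_mem
  intro acc j hj
  rw [PySem.List.slice_to_natCast ((splitC stripped.toList).map String.ofList) (j + 1)]
  show bump acc (job, PySem.Str.join "_" (((splitC stripped.toList).map String.ofList).take (j + 1))) = _
  have hjoin : PySem.Str.join "_" (((splitC stripped.toList).map String.ofList).take (j + 1))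
      = String.ofList (PySem.Chars.join ['_'] ((splitC stripped.toList).take (j + 1))) := by
    rw [PySem.Str.join, ← List.map_take, List.map_map]
    have hm : (String.toList ∘ String.ofList) = id := funext fun p => by simp
    rw [hm, List.map_id, show "_".toList = ['_'] from rfl]
  rw [hjoin]

lemma step_eq (acc : PySem.Dict (String × String) Int) (series : List (String × String)) :
    (let metric_name := PySem.Dict.getD (PySem.Dict.mk series) "__name__" ""
     if is_info_metric metric_name then acc
     else
       let job := PySem.Dict.getD (PySem.Dict.mk series) "job" ""
       let stripped := strip_job_prefix metric_name job
       let parts := (PySem.Str.split? stripped "_").getD []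
       (PySem.List.pyRange 1 ((parts.length : Int) + 1) 1).foldl
         (fun d i =>
           let pfx := PySem.Str.join "_" (PySem.List.slice parts none (some i))
           PySem.Dict.modify d (job, pfx) 0 (· + 1))
         acc)
    = (let name := PySem.Dict.getD (PySem.Dict.mk series) "__name__" ""
       if PySem.Str.endswith name "_info" then acc
       else
         let job := PySem.Dict.getD (PySem.Dict.mk series) "job" ""
         let name2 :=
           if (!(job == "") && PySem.Str.startswith name (job ++ "_")) then
             PySem.Str.slice name (some (PySem.Str.len job + 1)) none
           else name
         let st := name2.toList.foldl
           (fun (s : PySem.Dict (String × String) Int × List Char) ch =>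
             let s1 := if ch = '_' then
                 PySem.Dict.insert s.1 (job, String.ofList s.2)
                   (PySem.Dict.getD s.1 (job, String.ofList s.2) 0 + 1)
               else s.1
             (s1, s.2 ++ [ch])) (acc, [])
         PySem.Dict.insert st.1 (job, String.ofList st.2)
           (PySem.Dict.getD st.1 (job, String.ofList st.2) 0 + 1)) := by
  by_cases hinfo :
      PySem.Str.endswith (PySem.Dict.getD (PySem.Dict.mk series) "__name__" "") "_info"
  · simp only [is_info_metric, hinfo, if_true]
  · simp only [is_info_metric, hinfo, Bool.false_eq_true, if_false]
    exact inner_eq (PySem.Dict.getD (PySem.Dict.mk series) "job" "")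
      (strip_job_prefix (PySem.Dict.getD (PySem.Dict.mk series) "__name__" "")
        (PySem.Dict.getD (PySem.Dict.mk series) "job" "")) acc

theorem analyze_metrics_spec : Claim_equal_analyze_metrics := by
  intro sl _
  show analyze_metrics sl = analyze_metrics_alt sl
  unfold analyze_metrics analyze_metrics_alt
  apply congrArg (fun dd : PySem.Dict (String × String) Int =>
    dd.items.map (fun p => (p.1.1, p.1.2, p.2)))
  exact PySem.List.foldl_congr_mem sl _ _ _ (fun acc series _ => step_eq acc series)
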